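-- pv_equiv track=rewrite | github.com/jvano74/advent_of_code | 2019/test_day_16.py | get_kernel
-- ===== SOURCE A (Python) =====
-- def get_kernel(k_len, pos):
--     kernel = []
--     cnt = 1
--     while True:
--         for e in [0, 1, 0, -1]:
--             while cnt < pos:
--                 kernel.append(e)
--                 cnt += 1
--                 if len(kernel) == k_len:
--                     return kernel
--             cnt = 0
-- ===== SOURCE B (Python) =====
-- def get_kernel(k_len, pos):
--     base = [0, 1, 0, -1]
--     return [base[((j + 1) // pos) % 4] for j in range(k_len)]
-- ===== Notes on version B (the rewrite author's own statement) =====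
-- stated objective: simpler
-- what changed: A's while-True/for/while counter state machine is replaced by a single comprehension that computes each kernel element directly from its index via base[((j+1)//pos)%4].
import Mathlib
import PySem

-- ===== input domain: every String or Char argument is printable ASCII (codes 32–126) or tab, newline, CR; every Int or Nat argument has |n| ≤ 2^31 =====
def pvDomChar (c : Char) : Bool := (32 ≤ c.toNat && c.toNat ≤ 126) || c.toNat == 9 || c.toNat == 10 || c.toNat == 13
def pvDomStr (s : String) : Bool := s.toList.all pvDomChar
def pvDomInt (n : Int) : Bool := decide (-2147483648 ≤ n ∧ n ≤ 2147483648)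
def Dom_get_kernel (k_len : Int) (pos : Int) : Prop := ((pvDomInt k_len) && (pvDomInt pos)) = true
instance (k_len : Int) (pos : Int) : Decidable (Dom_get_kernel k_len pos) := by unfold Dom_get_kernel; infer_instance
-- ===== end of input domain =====

-- B replaces A's while-True/for/while counter state machine with a single comprehension
-- computing each element directly from its index (objective: simpler).

-- ===== PORT A =====
-- inner 'while cnt < pos: kernel.append(e); cnt += 1; if len(kernel) == k_len: return kernel'
-- (.inr = the function returned, .inl = the while ended, followed by 'cnt = 0');
-- the remaining iteration count (pos - cnt).toNat is the loop's own measure, made the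
-- structural recursion argument so the port evaluates by reduction — same loop, step for step
def innerAGo (e k_len : Int) (d : Nat) (kernel : List Int) : (List Int × Int) ⊕ (List Int) :=
  match d with
  | 0 => Sum.inl (kernel, 0)
  | d + 1 =>
    if ((kernel ++ [e]).length : Int) = k_len then Sum.inr (kernel ++ [e])
    else innerAGo e k_len d (kernel ++ [e])

def innerA (e k_len pos : Int) (kernel : List Int) (cnt : Int) : (List Int × Int) ⊕ (List Int) :=
  innerAGo e k_len (pos - cnt).toNat kernel

-- 'for e in [0, 1, 0, -1]: …' (one pass of the for loop)
def forA (k_len pos : Int) (es : List Int) (kernel : List Int) (cnt : Int) : (List Int × Int) ⊕ (List Int) :=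
  match es with
  | [] => Sum.inl (kernel, cnt)
  | e :: rest =>
    match innerA e k_len pos kernel cnt with
    | Sum.inr r => Sum.inr r
    | Sum.inl (k, c) => forA k_len pos rest k c

-- 'while True: …'; the fuel only makes the loop total in Lean — under Pre_ it is never
-- exhausted (proved below), so this is A's loop step for step.
def whileA (fuel : Nat) (k_len pos : Int) (kernel : List Int) (cnt : Int) : List Int :=
  match fuel with
  | 0 => kernel
  | fuel + 1 =>
    match forA k_len pos [0, 1, 0, -1] kernel cnt with
    | Sum.inr r => r
    | Sum.inl (k, c) => whileA fuel k_len pos k c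

def get_kernel (k_len : Int) (pos : Int) : List Int :=
  whileA (k_len.toNat + 1) k_len pos [] 1

-- ===== PORT B =====
-- base[i] is ported with pyGetD: the index ((j+1)//pos) % 4 always lies in [0,4) (Python % with
-- positive divisor), so Python's indexing never raises and the default 0 is never used.
def get_kernel_alt (k_len : Int) (pos : Int) : List Int :=
  let base : List Int := [0, 1, 0, -1]
  (PySem.List.pyRange 0 k_len 1).map
    (fun j => PySem.List.pyGetD base (PySem.Int.mod (PySem.Int.floordiv (j + 1) pos) 4) 0)

-- ===== PRECONDITION & SPEC =====
-- A never returns outside Pre_: for pos ≤ 0 the inner while never runs and the outer loop spins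
-- forever, and for k_len ≤ 0 (with pos ≥ 1) len(kernel) takes the values 1,2,3,… and never
-- equals k_len, so A again loops forever. Pre_ excludes exactly these non-returning inputs.
def Pre_get_kernel (k_len : Int) (pos : Int) : Prop := 1 ≤ k_len ∧ 1 ≤ pos
instance (k_len : Int) (pos : Int) : Decidable (Pre_get_kernel k_len pos) := by
  unfold Pre_get_kernel; infer_instance

def pvWitness_get_kernel : Int × Int := (8, 3)

def Spec_get_kernel (k_len : Int) (pos : Int) (out : List Int) : Prop := out = get_kernel_alt k_len pos
instance (k_len : Int) (pos : Int) (out : List Int) : Decidable (Spec_get_kernel k_len pos out) := by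
  unfold Spec_get_kernel; infer_instance

-- ===== CLAIM (what is proved, stated in full; the proofs are below) =====
def Claim_equal_get_kernel : Prop := ∀ (k_len : Int) (pos : Int), Dom_get_kernel k_len pos → Pre_get_kernel k_len pos → Spec_get_kernel k_len pos (get_kernel k_len pos)

-- ===== LEMMAS AND PROOFS =====

-- the element B computes at (0-based) index j
def fB (pos j : Int) : Int :=
  PySem.List.pyGetD [0, 1, 0, -1] (PySem.Int.mod (PySem.Int.floordiv (j + 1) pos) 4) 0

-- the first n elements of B's pattern
def pref (pos : Int) (n : Nat) : List Int := (List.range n).map (fun (j : Nat) => fB pos (j : Int))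

theorem alt_eq_pref (k_len pos : Int) : get_kernel_alt k_len pos = pref pos k_len.toNat := by
  unfold get_kernel_alt pref fB
  have h : (k_len - 0).toNat = k_len.toNat := by omega
  rw [PySem.List.pyRange_one, List.map_map, h]
  apply List.map_congr_left
  intro j _
  simp only [Function.comp_apply, Int.zero_add]

-- value of fB inside the q-th run of pos equal elements
theorem fB_run (pos q j : Int) (hp : 1 ≤ pos) (_hq : 0 ≤ q)
    (h1 : q * pos ≤ j + 1) (h2 : j + 1 < (q + 1) * pos) :
    fB pos j = PySem.List.pyGetD [0, 1, 0, -1] (q % 4) 0 := by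
  unfold fB
  rw [show PySem.Int.floordiv (j + 1) pos = q from
        (PySem.Int.floordiv_eq_iff_of_pos (by omega)).mpr ⟨h1, h2⟩,
      PySem.Int.mod_eq_emod_of_pos (by norm_num)]

theorem append_singleton_replicate (kernel : List Int) (e : Int) (t : Nat) :
    kernel ++ [e] ++ List.replicate t e = kernel ++ List.replicate (t + 1) e := by
  rw [List.append_assoc, List.singleton_append, ← List.replicate_succ]

theorem inner_go (e k_len : Int) : ∀ (d : Nat) (kernel : List Int),
    innerAGo e k_len d kernel =
      (if (kernel.length : Int) < k_len ∧ k_len ≤ (kernel.length : Int) + (d : Int) then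
        Sum.inr (kernel ++ List.replicate (k_len - kernel.length).toNat e)
      else
        Sum.inl (kernel ++ List.replicate d e, 0)) := by
  intro d
  induction d with
  | zero =>
    intro kernel
    rw [innerAGo, if_neg (by omega)]
    simp
  | succ d ih =>
    intro kernel
    rw [innerAGo]
    have hL : ((kernel ++ [e]).length : Int) = (kernel.length : Int) + 1 := by
      simp
    by_cases heq : ((kernel ++ [e]).length : Int) = k_len
    · rw [if_pos heq]
      rw [if_pos (by omega)]
      rw [show (k_len - kernel.length).toNat = 1 from by omega]
      simp
    · rw [if_neg heq, ih (kernel ++ [e]), hL]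
      by_cases hcond : (kernel.length : Int) < k_len ∧ k_len ≤ (kernel.length : Int) + ((d : Int) + 1)
      · rw [if_pos (by omega), if_pos (by push_cast; omega)]
        rw [append_singleton_replicate,
            show (k_len - ((kernel.length : Int) + 1)).toNat + 1
              = (k_len - (kernel.length : Int)).toNat from by omega]
      · rw [if_neg (by omega), if_neg (by push_cast; omega)]
        rw [append_singleton_replicate]

theorem inner_spec (e k_len pos : Int) (kernel : List Int) (cnt : Int) :
    innerA e k_len pos kernel cnt =
      (if (kernel.length : Int) < k_len ∧ k_len ≤ (kernel.length : Int) + (pos - cnt) then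
        Sum.inr (kernel ++ List.replicate (k_len - kernel.length).toNat e)
      else
        Sum.inl (kernel ++ List.replicate (pos - cnt).toNat e, 0)) := by
  rw [innerA, inner_go]
  refine if_congr (by omega) rfl rfl

theorem pref_add (pos : Int) (n t : Nat) (e : Int)
    (h : ∀ j : Nat, n ≤ j → j < n + t → fB pos (j : Int) = e) :
    pref pos (n + t) = pref pos n ++ List.replicate t e := by
  unfold pref
  rw [List.range_add, List.map_append, List.map_map]
  congr 1
  rw [List.eq_replicate_iff]
  constructor
  · simp
  · intro b hb
    simp only [List.mem_map, List.mem_range, Function.comp_apply] at hb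
    obtain ⟨i, hi, hbe⟩ := hb
    rw [← hbe]
    exact h (n + i) (by omega) (by omega)

theorem len_pref (pos : Int) (n : Nat) : (pref pos n).length = n := by
  unfold pref; simp

-- one execution of the inner while, on an aligned state
theorem run_spec (k_len pos q cnt e : Int) (n : Nat) (hp : 1 ≤ pos) (hq : 0 ≤ q)
    (hc : 0 ≤ cnt) (hcp : cnt ≤ pos) (hn : (n : Int) < k_len)
    (hst : (n : Int) + (pos - cnt) = (q + 1) * pos - 1)
    (he : e = PySem.List.pyGetD [0, 1, 0, -1] (q % 4) 0) :
    innerA e k_len pos (pref pos n) cnt =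
      (if k_len ≤ (q + 1) * pos - 1 then Sum.inr (pref pos k_len.toNat)
      else Sum.inl (pref pos ((q + 1) * pos - 1).toNat, 0)) := by
  rw [inner_spec, len_pref]
  have hqp : (q + 1) * pos = q * pos + pos := by ring
  have hrun : ∀ j : Nat, n ≤ j → (j : Int) + 1 < (q + 1) * pos → fB pos (j : Int) = e := by
    intro j hj hlt
    rw [he]
    exact fB_run pos q j hp hq (by omega) hlt
  by_cases hcase : k_len ≤ (q + 1) * pos - 1
  · rw [if_pos (by omega), if_pos hcase]
    congr 1
    rw [show k_len.toNat = n + (k_len - (n : Int)).toNat from by omega]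
    exact (pref_add pos n (k_len - (n : Int)).toNat e (fun j hj hjt => hrun j hj (by omega))).symm
  · rw [if_neg (by omega), if_neg hcase]
    rw [show ((q + 1) * pos - 1).toNat = n + (pos - cnt).toNat from by omega]
    rw [pref_add pos n (pos - cnt).toNat e (fun j hj hjt => hrun j hj (by omega))]

-- one pass of the for loop over [0, 1, 0, -1]
theorem cycle_spec (k_len pos m cnt : Int) (n : Nat) (hp : 1 ≤ pos) (hm : 0 ≤ m)
    (hc : 0 ≤ cnt) (hcp : cnt ≤ pos) (hn : (n : Int) < k_len)
    (hst : (n : Int) + (pos - cnt) = 4 * pos * m + pos - 1) :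
    forA k_len pos [0, 1, 0, -1] (pref pos n) cnt =
      (if k_len ≤ 4 * pos * m + 4 * pos - 1 then Sum.inr (pref pos k_len.toNat)
      else Sum.inl (pref pos (4 * pos * m + 4 * pos - 1).toNat, 0)) := by
  have hmp : 0 ≤ pos * m := mul_nonneg (by omega) hm
  have l0 : 4 * pos * m = 4 * (pos * m) := by ring
  have l1 : (4 * m + 1) * pos = 4 * (pos * m) + pos := by ring
  have l2 : (4 * m + 1 + 1) * pos = 4 * (pos * m) + 2 * pos := by ring
  have l3 : (4 * m + 2 + 1) * pos = 4 * (pos * m) + 3 * pos := by ring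
  have l4 : (4 * m + 3 + 1) * pos = 4 * (pos * m) + 4 * pos := by ring
  simp only [forA]
  rw [run_spec k_len pos (4 * m) cnt 0 n hp (by omega) hc hcp hn (by omega)
      (by rw [show (4 * m) % 4 = 0 from by omega]; decide)]
  by_cases h1 : k_len ≤ (4 * m + 1) * pos - 1
  · rw [if_pos h1, if_pos (by omega)]
  · rw [if_neg h1]
    dsimp only
    have hn1 : ((((4 * m + 1) * pos - 1).toNat : Int)) = (4 * m + 1) * pos - 1 := by omega
    rw [run_spec k_len pos (4 * m + 1) 0 1 _ hp (by omega) le_rfl (by omega) (by omega)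
        (by omega) (by rw [show (4 * m + 1) % 4 = 1 from by omega]; decide)]
    by_cases h2 : k_len ≤ (4 * m + 1 + 1) * pos - 1
    · rw [if_pos h2, if_pos (by omega)]
    · rw [if_neg h2]
      dsimp only
      have hn2 : ((((4 * m + 1 + 1) * pos - 1).toNat : Int)) = (4 * m + 1 + 1) * pos - 1 := by
        omega
      rw [run_spec k_len pos (4 * m + 2) 0 0 _ hp (by omega) le_rfl (by omega) (by omega)
          (by rw [hn2]; ring) (by rw [show (4 * m + 2) % 4 = 2 from by omega]; decide)]
      by_cases h3 : k_len ≤ (4 * m + 2 + 1) * pos - 1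
      · rw [if_pos h3, if_pos (by omega)]
      · rw [if_neg h3]
        dsimp only
        have hn3 : ((((4 * m + 2 + 1) * pos - 1).toNat : Int)) = (4 * m + 2 + 1) * pos - 1 := by
          omega
        rw [run_spec k_len pos (4 * m + 3) 0 (-1) _ hp (by omega) le_rfl (by omega) (by omega)
            (by rw [hn3]; ring) (by rw [show (4 * m + 3) % 4 = 3 from by omega]; decide)]
        by_cases h4 : k_len ≤ (4 * m + 3 + 1) * pos - 1
        · rw [if_pos h4, if_pos (by omega)]
        · rw [if_neg h4]
          dsimp only
          rw [if_neg (by omega)]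
          rw [show (4 * m + 3 + 1) * pos - 1 = 4 * pos * m + 4 * pos - 1 from by ring]

theorem while_spec (fuel : Nat) (k_len pos : Int) : ∀ (m cnt : Int) (n : Nat),
    1 ≤ pos → 0 ≤ m →
    0 ≤ cnt → cnt ≤ pos → (n : Int) < k_len →
    (n : Int) + (pos - cnt) = 4 * pos * m + pos - 1 →
    k_len - (n : Int) ≤ (fuel : Int) →
    whileA fuel k_len pos (pref pos n) cnt = pref pos k_len.toNat := by
  induction fuel with
  | zero =>
    intro m cnt n hp hm hc hcp hn hst hf
    omega
  | succ fuel ih =>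
    intro m cnt n hp hm hc hcp hn hst hf
    have hmp : 0 ≤ pos * m := mul_nonneg (by omega) hm
    rw [whileA, cycle_spec k_len pos m cnt n hp hm hc hcp hn hst]
    by_cases hend : k_len ≤ 4 * pos * m + 4 * pos - 1
    · rw [if_pos hend]
    · rw [if_neg hend]
      have hn' : (((4 * pos * m + 4 * pos - 1).toNat : Int)) = 4 * pos * m + 4 * pos - 1 := by
        have : 0 ≤ 4 * pos * m + 4 * pos - 1 := by nlinarith
        omega
      exact ih (m + 1) 0 _ hp (by omega) le_rfl (by omega) (by omega)
        (by rw [hn']; ring) (by omega)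

-- ===== VERDICT (by name: the statement is the Claim_ definition above) =====
theorem get_kernel_spec : Claim_equal_get_kernel := by
  intro k_len pos _hdom hpre
  obtain ⟨hk, hp⟩ := hpre
  unfold Spec_get_kernel get_kernel
  rw [alt_eq_pref]
  have h0 : pref pos 0 = [] := rfl
  rw [← h0]
  exact while_spec (k_len.toNat + 1) k_len pos 0 1 0 hp le_rfl (by omega) hp
    (by exact_mod_cast hk) (by push_cast; ring) (by omega)
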